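-- pv_equiv track=rewrite | github.com/lake041/sesac-algorithm | 최성혁/프로그래머스/Lv02/n^2 배열 자르기.py | solution
-- ===== SOURCE A (Python) =====
-- def solution(n, left, right):
--     result = []
--
--     for i in range(left // n, right // n + 1):
--         row = i + 1
--         for j in range(n):
--             col = j + 1
--             value = max(row, col)
--             result.append(value)
--
--     return result[left % n: (right % n) + 1]
-- ===== SOURCE B (Python) =====
-- def solution(n, left, right):
--     if left > right:
--         return []
--     row = left // n + 1
--     return [max(row, p + 1) for p in range(left % n, right % n + 1)]
-- ===== Notes on version B (the rewrite author's own statement) =====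
-- stated objective: faster
-- what changed: B drops the nested row-building and slicing entirely: since A's slice only ever selects offsets left%n..right%n of the first generated row, B emits max(left//n+1, p+1) for each such offset in one comprehension (empty interval -> []).
-- outside the precondition, e.g. on solution(-3, 0, 0): A returns [], B returns [1]; on solution(0, 0, 0): A raises ZeroDivisionError, B raises ZeroDivisionError
import Mathlib
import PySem

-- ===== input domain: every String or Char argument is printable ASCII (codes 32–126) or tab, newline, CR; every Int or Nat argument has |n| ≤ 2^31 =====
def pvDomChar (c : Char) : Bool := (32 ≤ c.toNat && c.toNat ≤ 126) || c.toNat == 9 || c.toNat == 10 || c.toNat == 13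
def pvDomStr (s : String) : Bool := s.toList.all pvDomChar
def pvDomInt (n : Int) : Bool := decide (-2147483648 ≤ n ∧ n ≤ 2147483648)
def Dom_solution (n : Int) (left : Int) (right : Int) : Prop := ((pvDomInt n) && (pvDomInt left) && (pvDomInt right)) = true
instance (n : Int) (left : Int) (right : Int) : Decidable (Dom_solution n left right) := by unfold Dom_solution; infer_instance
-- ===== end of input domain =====

-- B replaces A's nested row-building + slice by one pass over the selected column
-- offsets of the starting row (objective: faster, no full rows are materialised).

-- ===== PORT A =====
def solution (n : Int) (left : Int) (right : Int) : List Int :=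
  let result :=
    (PySem.List.pyRange (PySem.Int.floordiv left n) (PySem.Int.floordiv right n + 1)).foldl
      (fun acc i =>
        (PySem.List.pyRange 0 n).foldl
          (fun acc2 j => acc2 ++ [max (i + 1) (j + 1)]) acc)
      []
  PySem.List.slice result (some (PySem.Int.mod left n)) (some (PySem.Int.mod right n + 1))

-- ===== PORT B =====
def solution_alt (n : Int) (left : Int) (right : Int) : List Int :=
  if left > right then []
  else
    let row := PySem.Int.floordiv left n + 1
    (PySem.List.pyRange (PySem.Int.mod left n) (PySem.Int.mod right n + 1)).map
      (fun p => max row (p + 1))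

-- ===== PRECONDITION & SPEC =====
-- Pre_ restricts to the task's natural domain 1 ≤ n: at n = 0 A raises
-- ZeroDivisionError, and for negative n A's inner range(n) is empty, an
-- accident of its row loop that a natural B has no reason to reproduce.
def Pre_solution (n : Int) (left : Int) (right : Int) : Prop := 1 ≤ n
instance (n : Int) (left : Int) (right : Int) : Decidable (Pre_solution n left right) := by unfold Pre_solution; infer_instance
def pvWitness_solution : Int × Int × Int := (3, 2, 5)

def Spec_solution (n : Int) (left : Int) (right : Int) (out : List Int) : Prop := out = solution_alt n left right
instance (n : Int) (left : Int) (right : Int) (out : List Int) : Decidable (Spec_solution n left right out) := by unfold Spec_solution; infer_instance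

-- ===== CLAIM (what is proved, stated in full; the proofs are below) =====
def Claim_equal_solution : Prop := ∀ (n : Int) (left : Int) (right : Int), Dom_solution n left right → Pre_solution n left right → Spec_solution n left right (solution n left right)

-- ===== LEMMAS AND PROOFS =====

-- A's loop body, after the two fold-shape lemmas: the flattened rows.
theorem solution_result (n left right : Int) :
    ((PySem.List.pyRange (PySem.Int.floordiv left n) (PySem.Int.floordiv right n + 1)).foldl
      (fun acc i =>
        (PySem.List.pyRange 0 n).foldl
          (fun acc2 j => acc2 ++ [max (i + 1) (j + 1)]) acc)
      []) =
    (PySem.List.pyRange (PySem.Int.floordiv left n) (PySem.Int.floordiv right n + 1)).flatMap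
      (fun i => (PySem.List.pyRange 0 n).map (fun j => max (i + 1) (j + 1))) := by
  simp only [PySem.List.foldl_append_singleton_eq_map]
  rw [PySem.List.foldl_append_eq_flatMap]
  simp

-- the slice of range(n) picked by A is exactly B's column range
theorem take_drop_pyRange (a b n : Nat) (hb : b ≤ n) :
    ((PySem.List.pyRange 0 (n : Int)).drop a).take (b - a) =
    PySem.List.pyRange (a : Int) (b : Int) := by
  apply List.ext_getElem
  · simp [PySem.List.length_pyRange_one]
    omega
  · intro k h1 h2
    simp only [List.getElem_take, List.getElem_drop,
      PySem.List.getElem_pyRange_one]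
    have : (0 : Int) + (a + k : Nat) = (a : Int) + (k : Nat) := by push_cast; ring
    exact this

theorem solution_eq (n left right : Int) (hn : 1 ≤ n) :
    solution n left right = solution_alt n left right := by
  have hn0 : 0 < n := hn
  set q := PySem.Int.floordiv left n with hq
  set r := PySem.Int.floordiv right n with hr
  set a := PySem.Int.mod left n with ha
  set b := PySem.Int.mod right n with hb
  have hqe : q = left / n := by rw [hq, PySem.Int.floordiv_eq_ediv_of_pos hn0]
  have hre : r = right / n := by rw [hr, PySem.Int.floordiv_eq_ediv_of_pos hn0]
  have hae : a = left % n := by rw [ha, PySem.Int.mod_eq_emod_of_pos hn0]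
  have hbe : b = right % n := by rw [hb, PySem.Int.mod_eq_emod_of_pos hn0]
  have ha0 : 0 ≤ a := by rw [hae]; exact Int.emod_nonneg _ (by omega)
  have ha1 : a < n := by rw [hae]; exact Int.emod_lt_of_pos _ hn0
  have hb0 : 0 ≤ b := by rw [hbe]; exact Int.emod_nonneg _ (by omega)
  have hb1 : b < n := by rw [hbe]; exact Int.emod_lt_of_pos _ hn0
  have hL : n * q + a = left := by rw [hqe, hae]; exact Int.mul_ediv_add_emod left n
  have hR : n * r + b = right := by rw [hre, hbe]; exact Int.mul_ediv_add_emod right n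
  -- cast the slice bounds to naturals
  obtain ⟨a', ha'⟩ : ∃ a' : Nat, a = (a' : Int) := ⟨a.toNat, (Int.toNat_of_nonneg ha0).symm⟩
  obtain ⟨b', hb'⟩ : ∃ b' : Nat, b = (b' : Int) := ⟨b.toNat, (Int.toNat_of_nonneg hb0).symm⟩
  obtain ⟨n', hn'⟩ : ∃ n' : Nat, n = (n' : Int) := ⟨n.toNat, (Int.toNat_of_nonneg (by omega)).symm⟩
  have hb'n : b' + 1 ≤ n' := by omega
  have ha'n : a' ≤ n' := by omega
  unfold solution
  rw [solution_result n left right, ← hq, ← hr, ← ha, ← hb]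
  have hslice : (some (b + 1) : Option Int) = some ((b' + 1 : Nat) : Int) := by
    rw [hb']; push_cast; rfl
  rw [ha', hslice, PySem.List.slice_natCast]
  by_cases hlr : left ≤ right
  · -- nonempty query: the slice lies inside the first generated row
    have hqr : q ≤ r := by rw [hqe, hre]; exact Int.ediv_le_ediv hn0 hlr
    rw [PySem.List.pyRange_one_cons (by omega : q < r + 1), List.flatMap_cons]
    have hrowlen : ((PySem.List.pyRange 0 n).map (fun j => max (q + 1) (j + 1))).length = n' := by
      simp [PySem.List.length_pyRange_one, hn']
    rw [List.drop_append_of_le_length (by rw [hrowlen]; omega),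
      List.take_append_of_le_length (by rw [List.length_drop, hrowlen]; omega)]
    rw [← List.map_drop, ← List.map_take]
    have hrange : ((PySem.List.pyRange 0 n).drop a').take (b' + 1 - a') =
        PySem.List.pyRange (a' : Int) ((b' + 1 : Nat) : Int) := by
      rw [hn']; exact take_drop_pyRange a' (b' + 1) n' hb'n
    rw [hrange]
    unfold solution_alt
    rw [if_neg (by omega)]
    rw [← hq, ← ha, ← hb, ha', hb']
    push_cast
    rfl
  · -- empty query: both sides are empty
    have hrq : r ≤ q := by rw [hqe, hre]; exact Int.ediv_le_ediv hn0 (by omega)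
    unfold solution_alt
    rw [if_pos (by omega)]
    by_cases hqr : q = r
    · -- same row: the slice bounds cross (b < a)
      have hba : b < a := by
        have hd : a - b = left - right := by rw [← hL, ← hR, hqr]; ring
        omega
      rw [PySem.List.pyRange_one_cons (by omega : q < r + 1),
        PySem.List.pyRange_one_eq_nil (by omega : r + 1 ≤ q + 1)]
      simp only [List.flatMap_cons, List.flatMap_nil, List.append_nil]
      have : b' + 1 - a' = 0 := by omega
      rw [this, List.take_zero]
    · -- A builds no rows at all
      rw [PySem.List.pyRange_one_eq_nil (by omega : r + 1 ≤ q)]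
      simp

-- ===== VERDICT (by name: the statement is the Claim_ definition above) =====
theorem solution_spec : Claim_equal_solution := by
  intro n left right _ hpre
  unfold Spec_solution
  exact solution_eq n left right hpre
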